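-- pv_equiv track=rewrite | github.com/sioschul/ai-nlp | entity_matching.py | match_single_against_multi_word
-- ===== SOURCE A (Python) =====
-- def match_single_against_multi_word(single_word_ents, multi_word_ents):
--     # match single words against multi words
--     matched_ents = {}
--     for i in single_word_ents:
--         belong_together = []
--         for j in multi_word_ents:
--             if i in j:
--                 belong_together.append(j)
--         if i not in matched_ents.keys():
--             matched_ents[i] = belong_together
--     # add remaining multi word entities to matched_ents which do not have a single word counterpart
--     multi_to_add = []
--     for i in multi_word_ents:
--         found = False
--         for sublist in matched_ents.values():
--             if i in sublist:
--                 found = True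
--                 break
--         if not found:
--             multi_to_add.append(i)
--     for i in multi_to_add:
--         matched_ents[i] = []
--     return matched_ents
-- ===== SOURCE B (Python) =====
-- def match_single_against_multi_word(single_word_ents, multi_word_ents):
--     # Seed every (deduped) single word with an empty group, then make ONE pass
--     # over the multi-word entities: append each multi to every single it
--     # contains; a multi containing no single becomes its own empty-group key.
--     matched_ents = {}
--     for i in single_word_ents:
--         if i not in matched_ents:
--             matched_ents[i] = []
--     singles = list(matched_ents)
--     for j in multi_word_ents:
--         contained = False
--         for i in singles:
--             if i in j:
--                 matched_ents[i].append(j)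
--                 contained = True
--         if not contained and j not in matched_ents:
--             matched_ents[j] = []
--     return matched_ents
-- ===== Notes on version B (the rewrite author's own statement) =====
-- stated objective: alternative
-- what changed: B inverts the loop nesting: instead of A's per-single scan over the multi list plus a second nested 'found' scan over all value lists, B seeds empty groups for the deduped singles and makes a single fused pass over the multi-word list, appending each multi to every containing single's group and inserting it as its own empty key when no single is contained.
import Mathlib
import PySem

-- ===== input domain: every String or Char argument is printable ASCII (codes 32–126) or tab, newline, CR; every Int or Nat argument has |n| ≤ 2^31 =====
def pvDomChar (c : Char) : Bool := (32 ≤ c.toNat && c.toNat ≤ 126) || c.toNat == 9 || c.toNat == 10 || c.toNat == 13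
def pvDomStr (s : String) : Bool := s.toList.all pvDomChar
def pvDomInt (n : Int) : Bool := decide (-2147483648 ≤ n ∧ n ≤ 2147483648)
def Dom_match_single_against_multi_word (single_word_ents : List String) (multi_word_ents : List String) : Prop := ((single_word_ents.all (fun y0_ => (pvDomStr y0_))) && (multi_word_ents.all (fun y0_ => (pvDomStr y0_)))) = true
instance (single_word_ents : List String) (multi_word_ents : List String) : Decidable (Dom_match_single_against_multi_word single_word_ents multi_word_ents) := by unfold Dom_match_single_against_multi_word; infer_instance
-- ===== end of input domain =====

-- B inverts the loop nesting: it seeds empty groups for the deduped singles and then makes one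
-- fused pass over the multi-word list, appending each multi to every containing single's group
-- and inserting it as its own empty key when no single is contained (objective: alternative).

-- ===== PORT A =====
def match_single_against_multi_word (single_word_ents : List String) (multi_word_ents : List String) : List (String × List String) :=
  -- matched_ents = {}; for i in single_word_ents: …
  let matched_ents : PySem.Dict String (List String) :=
    single_word_ents.foldl (fun d i =>
      let belong_together : List String :=
        multi_word_ents.foldl (fun acc j => if PySem.Str.isIn i j then acc ++ [j] else acc) []
      if !(d.contains i) then d.insert i belong_together else d) PySem.Dict.empty
  -- 'for sublist in …values(): if i in sublist: found = True; break' ported as .any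
  let multi_to_add : List String :=
    multi_word_ents.foldl (fun acc i =>
      let found := matched_ents.values.any (fun sublist => sublist.contains i)
      if !found then acc ++ [i] else acc) []
  (multi_to_add.foldl (fun d i => d.insert i ([] : List String)) matched_ents).items

-- ===== PORT B =====
def match_single_against_multi_word_alt (single_word_ents : List String) (multi_word_ents : List String) : List (String × List String) :=
  -- seed empty groups for the (deduped) singles
  let matched0 : PySem.Dict String (List String) :=
    single_word_ents.foldl (fun d i => if !(d.contains i) then d.insert i ([] : List String) else d) PySem.Dict.empty
  let singles : List String := matched0.keys
  -- one fused pass over the multi-word entities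
  (multi_word_ents.foldl (fun d j =>
      let p : PySem.Dict String (List String) × Bool :=
        singles.foldl (fun p i =>
          if PySem.Str.isIn i j then (p.1.modify i [] (fun l => l ++ [j]), true) else p) (d, false)
      if !p.2 && !(p.1.contains j) then p.1.insert j ([] : List String) else p.1)
    matched0).items

-- ===== PRECONDITION & SPEC =====
def Spec_match_single_against_multi_word (single_word_ents : List String) (multi_word_ents : List String) (out : List (String × List String)) : Prop := out = match_single_against_multi_word_alt single_word_ents multi_word_ents
instance (single_word_ents : List String) (multi_word_ents : List String) (out : List (String × List String)) : Decidable (Spec_match_single_against_multi_word single_word_ents multi_word_ents out) := by unfold Spec_match_single_against_multi_word; infer_instance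

-- ===== CLAIM (what is proved, stated in full; the proofs are below) =====
def Claim_equal_match_single_against_multi_word : Prop := ∀ (single_word_ents : List String) (multi_word_ents : List String), Dom_match_single_against_multi_word single_word_ents multi_word_ents → Spec_match_single_against_multi_word single_word_ents multi_word_ents (match_single_against_multi_word single_word_ents multi_word_ents)

-- ===== LEMMAS AND PROOFS =====

-- the filter every single-word key's value list amounts to
def pvFilt (m : List String) (i : String) : List String := m.filter (fun j => PySem.Str.isIn i j)

-- 'j has no single-word counterpart'
def pvUnm (s : List String) (j : String) : Bool := !((PySem.List.dedup s).any (fun i => PySem.Str.isIn i j))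

-- every string contains itself
theorem pv_isIn_self (x : String) : PySem.Str.isIn x x = true := by
  simpa using (PySem.Chars.isIn_iff_infix (sub := x.toList) (s := x.toList)).mpr (List.infix_refl _)

-- a guarded first-insert loop = plain inserts over the not-yet-present deduped keys
theorem pv_stage1_general (v : String → List String) :
    ∀ (s : List String) (d : PySem.Dict String (List String)),
      s.foldl (fun d i => if !(d.contains i) then d.insert i (v i) else d) d
        = ((PySem.List.dedup s).filter (fun i => !(d.contains i))).foldl
            (fun d i => d.insert i (v i)) d := by
  intro s
  induction s with
  | nil => intro d; rfl
  | cons i t ih =>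
    intro d
    have hded : PySem.List.dedup (i :: t) = i :: PySem.Set.discard (PySem.List.dedup t) i := by
      simp [PySem.List.dedup_eq_ofList, PySem.Set.ofList_cons]
    have hdisc : PySem.Set.discard (PySem.List.dedup t) i
        = (PySem.List.dedup t).filter (fun y => !(y == i)) := rfl
    by_cases h : d.contains i = true
    · simp only [List.foldl_cons, h, Bool.not_true, Bool.false_eq_true, if_false]
      rw [ih d, hded]
      congr 1
      simp only [List.filter_cons, h, Bool.not_true, Bool.false_eq_true, if_false, hdisc,
        List.filter_filter]
      apply List.filter_congr
      intro x _
      by_cases hx : x = i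
      · subst hx; simp [h]
      · simp [hx]
    · have h' : d.contains i = false := by simpa using h
      simp only [List.foldl_cons, h', Bool.not_false, if_true]
      rw [ih (d.insert i (v i)), hded]
      simp only [List.filter_cons, h', Bool.not_false, if_true, List.foldl_cons, hdisc,
        List.filter_filter]
      congr 1
      apply List.filter_congr
      intro x _
      rw [PySem.Dict.contains_insert]
      by_cases hx : x = i
      · subst hx; simp
      · simp [Bool.and_comm]

-- the dictionary A holds after the single-word phase
def pvD1 (s m : List String) : PySem.Dict String (List String) :=
  (PySem.List.dedup s).foldl (fun d i => d.insert i (pvFilt m i)) PySem.Dict.empty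

theorem pvD1_items (s m : List String) :
    (pvD1 s m).items = (PySem.List.dedup s).map (fun i => (i, pvFilt m i)) := by
  have := PySem.Dict.items_foldl_insert_fresh (l := PySem.List.dedup s)
      (k := fun i => i) (v := fun i => pvFilt m i) (d := (PySem.Dict.empty : PySem.Dict String (List String)))
      (by intro a _; simp) (by simp)
  simpa [pvD1] using this

theorem pvD1_keys (s m : List String) : (pvD1 s m).keys = PySem.List.dedup s := by
  simp [PySem.Dict.keys, pvD1_items, Function.comp_def]

theorem pvD1_keys_nodup (s m : List String) : (pvD1 s m).keys.Nodup := by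
  rw [pvD1_keys]; exact PySem.List.nodup_dedup s

theorem pvD1_getD_mem (s m : List String) (k : String) (hk : k ∈ PySem.List.dedup s) :
    (pvD1 s m).getD k [] = pvFilt m k := by
  have hmem : (k, pvFilt m k) ∈ (pvD1 s m).items := by
    rw [pvD1_items]; exact List.mem_map.mpr ⟨k, hk, rfl⟩
  exact PySem.Dict.getD_of_mem_items _ hmem (pvD1_keys_nodup s m) []

theorem pvD1_getD_not_mem (s m : List String) (k : String) (hk : k ∉ PySem.List.dedup s) :
    (pvD1 s m).getD k [] = [] := by
  have hkk : k ∉ (pvD1 s m).keys := by rw [pvD1_keys]; exact hk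
  have h0 : (pvD1 s m).get? k = none := (PySem.Dict.get?_eq_none_iff_not_mem_keys _ _).mpr hkk
  simp [PySem.Dict.getD, h0]

-- the 'found' scan over the value lists = some single is a substring (for j drawn from m)
theorem pv_found_eq (s m : List String) (j : String) (hj : j ∈ m) :
    ((pvD1 s m).values.any (fun sublist => sublist.contains j))
      = ((PySem.List.dedup s).any (fun i => PySem.Str.isIn i j)) := by
  rw [Bool.eq_iff_iff]
  simp [PySem.Dict.values, pvD1_items, List.any_eq_true, pvFilt, List.mem_filter, hj]

-- ---- A's final insert loop, characterised by keys / getD ----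

theorem pvA_getD_other (k : String) :
    ∀ (L : List String) (d : PySem.Dict String (List String)), (∀ j ∈ L, j ≠ k) →
      (L.foldl (fun d j => d.insert j ([] : List String)) d).getD k [] = d.getD k [] := by
  intro L
  induction L with
  | nil => intro d _; rfl
  | cons j t ih =>
    intro d h
    rw [List.foldl_cons, ih _ (fun x hx => h x (by simp [hx]))]
    exact PySem.Dict.getD_insert_of_ne d [] [] (fun he => h j (by simp) he.symm)

theorem pvA_getD_nil (k : String) :
    ∀ (L : List String) (d : PySem.Dict String (List String)), d.getD k [] = [] →
      (L.foldl (fun d j => d.insert j ([] : List String)) d).getD k [] = [] := by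
  intro L
  induction L with
  | nil => intro d h; exact h
  | cons j t ih =>
    intro d h
    rw [List.foldl_cons]
    apply ih
    by_cases hjk : k = j
    · subst hjk; exact PySem.Dict.getD_insert_self d k [] []
    · rw [PySem.Dict.getD_insert_of_ne d [] [] hjk]; exact h

-- ---- B's inner fold over the singles, characterised ----

theorem pvB_inner_bool (j : String) :
    ∀ (S : List String) (d : PySem.Dict String (List String)) (b : Bool),
      (S.foldl (fun p i =>
          if PySem.Str.isIn i j then (p.1.modify i [] (fun l => l ++ [j]), true) else p) (d, b)).2
        = (b || S.any (fun i => PySem.Str.isIn i j)) := by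
  intro S
  induction S with
  | nil => intro d b; simp
  | cons i t ih =>
    intro d b
    by_cases h : PySem.Str.isIn i j = true
    · rw [List.foldl_cons, if_pos h, ih]
      simp [show PySem.Chars.isIn i.toList j.toList = true from h]
    · have h' : PySem.Str.isIn i j = false := by simpa using h
      rw [List.foldl_cons, if_neg (by rw [h']; simp), ih]
      simp [show PySem.Chars.isIn i.toList j.toList = false from h']

theorem pvB_inner_keys (j : String) :
    ∀ (S : List String) (d : PySem.Dict String (List String)) (b : Bool),
      (∀ i ∈ S, i ∈ d.keys) →
      (S.foldl (fun p i =>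
          if PySem.Str.isIn i j then (p.1.modify i [] (fun l => l ++ [j]), true) else p) (d, b)).1.keys
        = d.keys := by
  intro S
  induction S with
  | nil => intro d b _; rfl
  | cons i t ih =>
    intro d b h
    by_cases hij : PySem.Str.isIn i j = true
    · rw [List.foldl_cons, if_pos hij]
      have hk : (d.modify i [] (fun l => l ++ [j])).keys = d.keys := by
        rw [PySem.Dict.keys_modify]
        exact PySem.Dict.keys_insert_of_contains _ _
          ((PySem.Dict.contains_iff_mem_keys d i).mpr (h i (by simp)))
      rw [ih _ true (by intro x hx; rw [hk]; exact h x (by simp [hx])), hk]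
    · have h' : PySem.Str.isIn i j = false := by simpa using hij
      rw [List.foldl_cons, if_neg (by rw [h']; simp)]
      exact ih _ b (fun x hx => h x (by simp [hx]))

theorem pvB_inner_getD (j k : String) :
    ∀ (S : List String) (d : PySem.Dict String (List String)) (b : Bool), S.Nodup →
      (S.foldl (fun p i =>
          if PySem.Str.isIn i j then (p.1.modify i [] (fun l => l ++ [j]), true) else p) (d, b)).1.getD k []
        = if k ∈ S ∧ PySem.Str.isIn k j = true then d.getD k [] ++ [j] else d.getD k [] := by
  intro S
  induction S with
  | nil => intro d b _; simp
  | cons i t ih =>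
    intro d b hnd
    have hndt : t.Nodup := (List.nodup_cons.mp hnd).2
    have hit : i ∉ t := (List.nodup_cons.mp hnd).1
    by_cases hij : PySem.Str.isIn i j = true
    · rw [List.foldl_cons, if_pos hij]
      rw [ih _ true hndt]
      by_cases hk : k = i
      · subst hk
        have hkt : ¬ (k ∈ t ∧ PySem.Str.isIn k j = true) := fun hc => hit hc.1
        rw [if_neg hkt, if_pos ⟨by simp, hij⟩]
        exact PySem.Dict.getD_modify_self _ _ _ _
      · rw [PySem.Dict.getD_modify_of_ne d [] (fun l => l ++ [j]) hk]
        by_cases hkc : k ∈ t ∧ PySem.Str.isIn k j = true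
        · rw [if_pos hkc, if_pos ⟨List.mem_cons_of_mem i hkc.1, hkc.2⟩]
        · rw [if_neg hkc, if_neg]
          intro hc
          apply hkc
          refine ⟨?_, hc.2⟩
          rcases List.mem_cons.mp hc.1 with h1 | h1
          · exact absurd h1 hk
          · exact h1
    · have h' : PySem.Str.isIn i j = false := by simpa using hij
      rw [List.foldl_cons, if_neg (by rw [h']; simp)]
      rw [ih _ b hndt]
      by_cases hkc : k ∈ t ∧ PySem.Str.isIn k j = true
      · rw [if_pos hkc, if_pos ⟨List.mem_cons_of_mem i hkc.1, hkc.2⟩]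
      · rw [if_neg hkc, if_neg]
        intro hc
        apply hkc
        refine ⟨?_, hc.2⟩
        rcases List.mem_cons.mp hc.1 with h | h
        · subst h; rw [hc.2] at h'; cases h'
        · exact h

-- ---- B's outer fold, characterised ----

-- invariant + postcondition of the fused multi-word pass
theorem pvB_outer (s : List String) :
    ∀ (r : List String) (d : PySem.Dict String (List String)),
      (∀ i ∈ PySem.List.dedup s, i ∈ d.keys) → d.keys.Nodup →
      (∀ k, k ∉ PySem.List.dedup s → d.getD k [] = []) →
      (let d' := r.foldl (fun d j =>
          let p : PySem.Dict String (List String) × Bool :=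
            (PySem.List.dedup s).foldl (fun p i =>
              if PySem.Str.isIn i j then (p.1.modify i [] (fun l => l ++ [j]), true) else p) (d, false)
          if !p.2 && !(p.1.contains j) then p.1.insert j ([] : List String) else p.1) d
       d'.keys = PySem.Set.update d.keys (r.filter (pvUnm s)) ∧ d'.keys.Nodup ∧
         (∀ k, k ∉ PySem.List.dedup s → d'.getD k [] = []) ∧
         (∀ k, k ∈ PySem.List.dedup s → d'.getD k [] = d.getD k [] ++ pvFilt r k)) := by
  intro r
  induction r with
  | nil =>
    intro d h1 h2 h3
    exact ⟨by simp [PySem.Set.update], h2, h3, fun k _ => by simp [pvFilt]⟩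
  | cons j t ih =>
    intro d h1 h2 h3
    simp only [List.foldl_cons]
    set p := (PySem.List.dedup s).foldl (fun p i =>
        if PySem.Str.isIn i j then (p.1.modify i [] (fun l => l ++ [j]), true) else p) (d, false) with hp
    have hpb : p.2 = (PySem.List.dedup s).any (fun i => PySem.Str.isIn i j) := by
      rw [hp, pvB_inner_bool]; simp
    have hpk : p.1.keys = d.keys := by rw [hp]; exact pvB_inner_keys j _ d false h1
    have hpg : ∀ k, p.1.getD k []
        = if k ∈ PySem.List.dedup s ∧ PySem.Str.isIn k j = true then d.getD k [] ++ [j] else d.getD k [] := by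
      intro k; rw [hp]; exact pvB_inner_getD j k _ d false (PySem.List.nodup_dedup s)
    by_cases hu : pvUnm s j = true
    · -- j unmatched: no single is contained in it, and j itself is not a single
      have hjs : j ∉ PySem.List.dedup s := by
        intro hjmem
        have hx : (PySem.List.dedup s).any (fun i => PySem.Str.isIn i j) = true :=
          List.any_eq_true.mpr ⟨j, hjmem, pv_isIn_self j⟩
        rw [pvUnm, hx] at hu; cases hu
      have hnp : p.2 = false := by rw [hpb]; simpa [pvUnm] using hu
      have hnok : ∀ k, k ∈ PySem.List.dedup s → PySem.Str.isIn k j = false := by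
        intro k hk
        by_contra hx
        have hx' : PySem.Str.isIn k j = true := by simpa using hx
        rw [pvUnm, List.any_eq_true.mpr ⟨k, hk, hx'⟩] at hu; cases hu
      have hpgid : ∀ k, p.1.getD k [] = d.getD k [] := by
        intro k
        rw [hpg k]
        by_cases hks : k ∈ PySem.List.dedup s
        · rw [if_neg (fun hc => by rw [hnok k hks] at hc; cases hc.2)]
        · rw [if_neg (fun hc => hks hc.1)]
      by_cases hc : p.1.contains j = true
      · -- j already a key: the guarded insert is skipped
        have hstep : (if (!p.2 && !(p.1.contains j)) = true then p.1.insert j ([] : List String) else p.1) = p.1 := by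
          rw [hc]; simp
        rw [hstep]
        have hrec := ih p.1 (by intro x hx; rw [hpk]; exact h1 x hx) (by rw [hpk]; exact h2)
          (fun k hk => by rw [hpgid k]; exact h3 k hk)
        refine ⟨?_, hrec.2.1, hrec.2.2.1, ?_⟩
        · rw [hrec.1, hpk]
          have hmem : j ∈ d.keys := by
            rw [← hpk]; exact (PySem.Dict.contains_iff_mem_keys _ _).mp hc
          simp [hu, PySem.Set.update_cons, PySem.Set.add, hmem]
        · intro k hk
          rw [hrec.2.2.2 k hk, hpgid k]
          simp [pvFilt, show PySem.Chars.isIn k.toList j.toList = false from hnok k hk]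
      · have hc' : p.1.contains j = false := by simpa using hc
        have hstep : (if (!p.2 && !(p.1.contains j)) = true then p.1.insert j ([] : List String) else p.1)
            = p.1.insert j ([] : List String) := by
          rw [hnp, hc']; simp
        rw [hstep]
        set d2 := p.1.insert j ([] : List String) with hd2
        have hk2 : d2.keys = d.keys ++ [j] := by
          rw [hd2, PySem.Dict.keys_insert_of_not_contains p.1 [] hc', hpk]
        have hg2 : ∀ k, k ≠ j → d2.getD k [] = d.getD k [] := by
          intro k hkj
          rw [hd2, PySem.Dict.getD_insert_of_ne p.1 [] [] hkj, hpgid k]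
        have hrec := ih d2
          (by intro x hx; rw [hk2]; exact List.mem_append.mpr (Or.inl (h1 x hx)))
          (by rw [hd2]; exact PySem.Dict.nodup_keys_insert p.1 j [] (by rw [hpk]; exact h2))
          (by
            intro k hk
            by_cases hkj : k = j
            · subst hkj; rw [hd2]; exact PySem.Dict.getD_insert_self p.1 k [] []
            · rw [hg2 k hkj]; exact h3 k hk)
        refine ⟨?_, hrec.2.1, hrec.2.2.1, ?_⟩
        · rw [hrec.1, hk2]
          have hmem : j ∉ d.keys := by
            rw [← hpk]; intro hm
            rw [(PySem.Dict.contains_iff_mem_keys p.1 j).mpr hm] at hc'; cases hc'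
          simp [hu, PySem.Set.update_cons, PySem.Set.add, hmem]
        · intro k hk
          have hkj : k ≠ j := fun he => hjs (he ▸ hk)
          rw [hrec.2.2.2 k hk, hg2 k hkj]
          simp [pvFilt, show PySem.Chars.isIn k.toList j.toList = false from hnok k hk]
    · -- j matched by some single: no insert, only the appends of the inner pass
      have hu' : pvUnm s j = false := by simpa using hu
      have hnp : p.2 = true := by rw [hpb]; simpa [pvUnm] using hu'
      have hstep : (if (!p.2 && !(p.1.contains j)) = true then p.1.insert j ([] : List String) else p.1) = p.1 := by
        rw [hnp]; simp
      rw [hstep]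
      have hrec := ih p.1 (by intro x hx; rw [hpk]; exact h1 x hx) (by rw [hpk]; exact h2)
        (by intro k hk; rw [hpg k, if_neg (fun hcon => hk hcon.1)]; exact h3 k hk)
      refine ⟨?_, hrec.2.1, hrec.2.2.1, ?_⟩
      · rw [hrec.1, hpk, List.filter_cons, if_neg (by rw [hu']; simp)]
      · intro k hk
        rw [hrec.2.2.2 k hk, hpg k]
        by_cases hkj : PySem.Str.isIn k j = true
        · rw [if_pos ⟨hk, hkj⟩]
          simp [pvFilt, List.append_assoc,
            show PySem.Chars.isIn k.toList j.toList = true from hkj]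
        · have hkj' : PySem.Str.isIn k j = false := by simpa using hkj
          rw [if_neg (fun hc => by rw [hkj'] at hc; cases hc.2)]
          simp [pvFilt, show PySem.Chars.isIn k.toList j.toList = false from hkj']

-- ---- B's seed dict ----

theorem pvB_seed (s : List String) :
    s.foldl (fun d i => if !(d.contains i) then d.insert i ([] : List String) else d) PySem.Dict.empty
      = (PySem.List.dedup s).foldl (fun d i => d.insert i ([] : List String)) PySem.Dict.empty := by
  rw [pv_stage1_general (fun _ => []) s PySem.Dict.empty]
  congr 1
  apply List.filter_eq_self.mpr; intro a _; simp

def pvD0 (s : List String) : PySem.Dict String (List String) :=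
  (PySem.List.dedup s).foldl (fun d i => d.insert i ([] : List String)) PySem.Dict.empty

theorem pvD0_items (s : List String) :
    (pvD0 s).items = (PySem.List.dedup s).map (fun i => (i, ([] : List String))) := by
  have := PySem.Dict.items_foldl_insert_fresh (l := PySem.List.dedup s)
      (k := fun i => i) (v := fun _ => ([] : List String)) (d := (PySem.Dict.empty : PySem.Dict String (List String)))
      (by intro a _; simp) (by simp)
  simpa [pvD0] using this

theorem pvD0_keys (s : List String) : (pvD0 s).keys = PySem.List.dedup s := by
  simp [PySem.Dict.keys, pvD0_items, Function.comp_def]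

theorem pvD0_getD (s : List String) (k : String) : (pvD0 s).getD k [] = [] := by
  by_cases hk : k ∈ PySem.List.dedup s
  · have hmem : (k, ([] : List String)) ∈ (pvD0 s).items := by
      rw [pvD0_items]; exact List.mem_map.mpr ⟨k, hk, rfl⟩
    exact PySem.Dict.getD_of_mem_items _ hmem (by rw [pvD0_keys]; exact PySem.List.nodup_dedup s) []
  · have hkk : k ∉ (pvD0 s).keys := by rw [pvD0_keys]; exact hk
    have h0 : (pvD0 s).get? k = none := (PySem.Dict.get?_eq_none_iff_not_mem_keys _ _).mpr hkk
    simp [PySem.Dict.getD, h0]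

-- ---- the equivalence proper ----

theorem match_single_against_multi_word_eq (s m : List String) :
    match_single_against_multi_word s m = match_single_against_multi_word_alt s m := by
  unfold match_single_against_multi_word match_single_against_multi_word_alt
  dsimp only
  -- A's first phase is pvD1
  have hA1 : s.foldl (fun d i =>
        if !(d.contains i) then
          d.insert i (m.foldl (fun acc j => if PySem.Str.isIn i j then acc ++ [j] else acc) [])
        else d) PySem.Dict.empty = pvD1 s m := by
    have hbody : (fun (d : PySem.Dict String (List String)) (i : String) =>
        if !(d.contains i) then
          d.insert i (m.foldl (fun acc j => if PySem.Str.isIn i j then acc ++ [j] else acc) [])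
        else d) = (fun d i => if !(d.contains i) then d.insert i (pvFilt m i) else d) := by
      funext d i
      rw [PySem.List.foldl_append_if_eq_filter, List.nil_append]
      rfl
    rw [hbody, pv_stage1_general (pvFilt m) s PySem.Dict.empty]
    have hfilter : ((PySem.List.dedup s).filter
        (fun i => !((PySem.Dict.empty : PySem.Dict String (List String)).contains i)))
        = PySem.List.dedup s := by
      apply List.filter_eq_self.mpr; intro a _; simp
    rw [hfilter]; rfl
  rw [hA1]
  -- A's multi_to_add is the unmatched filter
  have hadd : m.foldl (fun acc i =>
      if !((pvD1 s m).values.any (fun sublist => sublist.contains i)) then acc ++ [i] else acc) []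
      = m.filter (pvUnm s) := by
    rw [PySem.List.foldl_append_if_eq_filter, List.nil_append]
    apply List.filter_congr
    intro j hj
    rw [pv_found_eq s m j hj]; rfl
  rw [hadd]
  -- B's seed loop is pvD0, its key list is dedup s
  rw [pvB_seed s,
    show List.foldl (fun (d : PySem.Dict String (List String)) i => d.insert i ([] : List String))
      PySem.Dict.empty (PySem.List.dedup s) = pvD0 s from rfl, pvD0_keys s]
  -- characterise both final dicts
  set dA := (m.filter (pvUnm s)).foldl (fun d i => d.insert i ([] : List String)) (pvD1 s m) with hdA
  have hAkeys : dA.keys = PySem.Set.update (PySem.List.dedup s) (m.filter (pvUnm s)) := by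
    rw [hdA, PySem.Dict.keys_foldl_insert (f := fun _ _ => ([] : List String)), pvD1_keys]
  have hAnodup : dA.keys.Nodup := by
    rw [hdA]
    exact PySem.Dict.nodup_keys_foldl_insert _ _ _ (pvD1_keys_nodup s m)
  have hAgetD_in : ∀ k ∈ PySem.List.dedup s, dA.getD k [] = pvFilt m k := by
    intro k hk
    have hno : ∀ j ∈ m.filter (pvUnm s), j ≠ k := by
      intro j hj he
      subst he
      rw [List.mem_filter] at hj
      have h2 := hj.2
      simp only [pvUnm, Bool.not_eq_true', List.any_eq_false] at h2
      exact absurd (pv_isIn_self j) (by simpa using h2 j hk)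
    rw [hdA, pvA_getD_other k _ _ hno, pvD1_getD_mem s m k hk]
  have hAgetD_out : ∀ k, k ∉ PySem.List.dedup s → dA.getD k [] = [] := by
    intro k hk
    rw [hdA]
    exact pvA_getD_nil k _ _ (pvD1_getD_not_mem s m k hk)
  -- B's final dict via the outer invariant
  have hB := pvB_outer s m (pvD0 s)
    (by intro i hi; rw [pvD0_keys]; exact hi)
    (by rw [pvD0_keys]; exact PySem.List.nodup_dedup s)
    (by intro k _; exact pvD0_getD s k)
  simp only at hB
  set dB := m.foldl (fun d j =>
      let p : PySem.Dict String (List String) × Bool :=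
        (PySem.List.dedup s).foldl (fun p i =>
          if PySem.Str.isIn i j then (p.1.modify i [] (fun l => l ++ [j]), true) else p) (d, false)
      if !p.2 && !(p.1.contains j) then p.1.insert j ([] : List String) else p.1) (pvD0 s) with hdB
  obtain ⟨hBkeys, hBnodup, hBout, hBin⟩ := hB
  rw [pvD0_keys s] at hBkeys
  -- items of both equal the common key list paired with the common lookups
  rw [PySem.Dict.items_eq_map_keys dA hAnodup [], PySem.Dict.items_eq_map_keys dB hBnodup []]
  rw [hAkeys, hBkeys]
  apply List.map_congr_left
  intro k hk
  by_cases hks : k ∈ PySem.List.dedup s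
  · rw [hAgetD_in k hks, hBin k hks, pvD0_getD s k, List.nil_append]
  · rw [hAgetD_out k hks, hBout k hks]

-- ===== VERDICT (by name: the statement is the Claim_ definition above) =====
theorem match_single_against_multi_word_spec : Claim_equal_match_single_against_multi_word := by
  intro s m _
  exact match_single_against_multi_word_eq s m
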